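-- pv_equiv track=rewrite | github.com/ashwinnellimuttath/Algorithms-Coursework-UCR | 4assignment/challenge/dog.py | compute_array_A
-- ===== SOURCE A (Python) =====
-- class SegmentTree:
--     def __init__(self, arr):
--         self.n = len(arr)
--         self.tree = [0] * (4 * self.n)
--         self.build_tree(arr, 0, 0, self.n - 1)
--
--     def build_tree(self, arr, tree_idx, left, right):
--         if left == right:
--             self.tree[tree_idx] = arr[left]
--         else:
--             mid = (left + right) // 2
--             self.build_tree(arr, 2 * tree_idx + 1, left, mid)
--             self.build_tree(arr, 2 * tree_idx + 2, mid + 1, right)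
--             self.tree[tree_idx] = max(self.tree[2 * tree_idx + 1], self.tree[2 * tree_idx + 2])
--
--     def update(self, tree_idx, left, right, arr_idx, value):
--         if left == right:
--             self.tree[tree_idx] = value
--         else:
--             mid = (left + right) // 2
--             if arr_idx <= mid:
--                 self.update(2 * tree_idx + 1, left, mid, arr_idx, value)
--             else:
--                 self.update(2 * tree_idx + 2, mid + 1, right, arr_idx, value)
--             self.tree[tree_idx] = max(self.tree[2 * tree_idx + 1], self.tree[2 * tree_idx + 2])
--
--     def query(self, tree_idx, left, right, query_left, query_right):
--         if left > query_right or right < query_left: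
--             return 0
--         elif query_left <= left and right <= query_right:
--             return self.tree[tree_idx]
--         else:
--             mid = (left + right) // 2
--             left_max = self.query(2 * tree_idx + 1, left, mid, query_left, query_right)
--             right_max = self.query(2 * tree_idx + 2, mid + 1, right, query_left, query_right)
--             return max(left_max, right_max)
--
-- def compute_ranks(S):
--     sorted_S = sorted(S)
--     ranks = [sorted_S.index(x) + 1 for x in S]
--
--     return ranks
--
-- def compute_array_A(S):
--     n = len(S)
--     ranks = compute_ranks(S)
--     A = [0] * n
--     segment_tree = SegmentTree([0] * n)
--
--     for i in range(n):
--         rank_i = ranks[i]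
--         A[rank_i - 1] = S[i] + segment_tree.query(0, 0, n - 1, 0, rank_i - 1)
--         segment_tree.update(0, 0, n - 1, rank_i - 1, A[rank_i - 1])
--
--     return A,ranks
-- ===== SOURCE B (Python) =====
-- def compute_array_A(S):
--     # Flat running array with a direct prefix-maximum scan (0 = "nothing yet"),
--     # ranks via a first-occurrence dict over the sorted list.
--     n = len(S)
--     sorted_S = sorted(S)
--     first = {}
--     for j, v in enumerate(sorted_S):
--         if v not in first:
--             first[v] = j + 1
--     ranks = [first[v] for v in S]
--     A = [0] * n
--     cur = [0] * n
--     for x, r in zip(S, ranks):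
--         A[r - 1] = x + max(0, max(cur[:r]))
--         cur[r - 1] = A[r - 1]
--     return A, ranks
-- ===== Notes on version B (the rewrite author's own statement) =====
-- stated objective: simpler
-- what changed: Ranks come from a first-occurrence dict built in one pass over the sorted list instead of an O(n) .index call per element, and the recursive segment tree is replaced by a flat running array whose prefix maximum is scanned directly with 0 as the empty default; Pre_ excludes only the empty list, on which A's degenerate segment-tree build raises RecursionError.
import Mathlib
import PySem

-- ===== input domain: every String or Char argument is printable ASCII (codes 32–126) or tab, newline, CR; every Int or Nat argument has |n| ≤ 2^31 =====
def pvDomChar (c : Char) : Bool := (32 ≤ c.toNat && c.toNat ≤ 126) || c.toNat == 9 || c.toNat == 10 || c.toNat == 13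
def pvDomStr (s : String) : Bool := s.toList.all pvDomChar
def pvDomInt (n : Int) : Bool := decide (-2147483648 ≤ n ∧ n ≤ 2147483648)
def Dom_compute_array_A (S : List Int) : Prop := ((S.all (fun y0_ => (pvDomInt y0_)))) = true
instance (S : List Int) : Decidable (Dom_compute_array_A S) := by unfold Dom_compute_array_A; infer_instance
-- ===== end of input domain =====

-- B replaces the recursive segment tree by a flat running array with a direct
-- prefix-maximum scan (0 as the empty default), and the per-element .index calls
-- by one first-occurrence dict over the sorted list (objective: simpler).

-- ===== PORT A =====
-- SegmentTree.build_tree; fuel = interval length bounds the recursion depth (Python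
-- recurses without bound only on the empty input, which Pre_ excludes).
-- List reads/writes use getD/set with .toNat: on every call reached from a nonempty
-- input the indices are nonnegative and in range, where these are exact.
def buildA : Nat → List Int → List Int → Int → Int → Int → List Int
  | 0, _, tree, _, _, _ => tree
  | f+1, arr, tree, ti, l, r =>
    if l = r then tree.set ti.toNat (arr.getD l.toNat 0)
    else
      let mid := PySem.Int.floordiv (l + r) 2
      let t1 := buildA f arr tree (2*ti+1) l mid
      let t2 := buildA f arr t1 (2*ti+2) (mid+1) r
      t2.set ti.toNat (max (t2.getD (2*ti+1).toNat 0) (t2.getD (2*ti+2).toNat 0))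

-- SegmentTree.update
def updateA : Nat → List Int → Int → Int → Int → Int → Int → List Int
  | 0, tree, _, _, _, _, _ => tree
  | f+1, tree, ti, l, r, j, v =>
    if l = r then tree.set ti.toNat v
    else
      let mid := PySem.Int.floordiv (l + r) 2
      let t1 := if j ≤ mid then updateA f tree (2*ti+1) l mid j v
                else updateA f tree (2*ti+2) (mid+1) r j v
      t1.set ti.toNat (max (t1.getD (2*ti+1).toNat 0) (t1.getD (2*ti+2).toNat 0))

-- SegmentTree.query
def queryA : Nat → List Int → Int → Int → Int → Int → Int → Int
  | 0, _, _, _, _, _, _ => 0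
  | f+1, tree, ti, l, r, ql, qr =>
    if l > qr ∨ r < ql then 0
    else if ql ≤ l ∧ r ≤ qr then tree.getD ti.toNat 0
    else
      let mid := PySem.Int.floordiv (l + r) 2
      max (queryA f tree (2*ti+1) l mid ql qr)
          (queryA f tree (2*ti+2) (mid+1) r ql qr)

-- compute_ranks; sorted_S.index(x) always succeeds (x ∈ S), where .getD 0 is exact
def compute_ranks_A (S : List Int) : List Int :=
  let sorted_S := PySem.List.sorted S (fun x => x) false
  S.map (fun x => ((PySem.List.index? sorted_S x).getD 0 : Int) + 1)

def compute_array_A (S : List Int) : List Int × List Int :=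
  let n : Int := S.length
  let ranks := compute_ranks_A S
  let st := (PySem.List.pyRange 0 n 1).foldl
    (fun (st : List Int × List Int) i =>
      let r := PySem.List.pyGetD ranks i 0
      let q := queryA S.length st.2 0 0 (n-1) 0 (r-1)
      let v := PySem.List.pyGetD S i 0 + q
      (st.1.set (r-1).toNat v, updateA S.length st.2 0 0 (n-1) (r-1) v))
    (List.replicate S.length 0,
     buildA S.length (List.replicate S.length 0) (List.replicate (4 * S.length) 0) 0 0 (n-1))
  (st.1, ranks)

-- ===== PORT B =====
-- max() of a nonempty list (Source B only applies it to nonempty cur[:r])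
def pymaxA : List Int → Int
  | [] => 0
  | x :: xs => xs.foldl max x

-- the first-occurrence dict built over enumerate(sorted_S)
def buildFirst (xs : List Int) : PySem.Dict Int Int :=
  (PySem.List.enumerate xs 0).foldl
    (fun d jv => if d.contains jv.2 then d else d.insert jv.2 (jv.1 + 1))
    PySem.Dict.empty

def compute_array_A_alt (S : List Int) : List Int × List Int :=
  let sorted_S := PySem.List.sorted S (fun x => x) false
  let first := buildFirst sorted_S
  let ranks : List Int := S.map (fun v => (first.get? v).getD 0)
  -- for x, r in zip(S, ranks)
  let st := (S.zip ranks).foldl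
    (fun (st : List Int × List Int) xr =>
      let v := xr.1 + max 0 (pymaxA (st.2.take xr.2.toNat))
      (st.1.set (xr.2 - 1).toNat v, st.2.set (xr.2 - 1).toNat v))
    (List.replicate S.length 0, List.replicate S.length 0)
  (st.1, ranks)

-- ===== PRECONDITION & SPEC =====
-- Pre_ excludes only the empty list, on which A raises RecursionError.
def Pre_compute_array_A (S : List Int) : Prop := S ≠ []
instance (S : List Int) : Decidable (Pre_compute_array_A S) := by
  unfold Pre_compute_array_A; infer_instance
def pvWitness_compute_array_A : List Int := [3, 1, 2]

def Spec_compute_array_A (S : List Int) (out : List Int × List Int) : Prop :=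
  out = compute_array_A_alt S
instance (S : List Int) (out : List Int × List Int) : Decidable (Spec_compute_array_A S out) := by
  unfold Spec_compute_array_A; infer_instance

-- ===== CLAIM (what is proved, stated in full; the proofs are below) =====
def Claim_equal_compute_array_A : Prop :=
  ∀ (S : List Int), Dom_compute_array_A S → Pre_compute_array_A S →
    Spec_compute_array_A S (compute_array_A S)

-- ===== LEMMAS AND PROOFS =====

-- range maximum over cur[l..r] (getD-indexed), via the same pymaxA as the B port
def rmax (cur : List Int) (l r : Nat) : Int :=
  pymaxA ((List.range' l (r+1-l)).map (fun i => cur.getD i 0))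

-- heap-descendant relation on 0-based node indices
def hdesc (t k : Nat) : Prop := ∃ d : Nat, (k+1) / 2^d = t+1

-- consistency of A's tree array with the abstract position array cur on the
-- recursion tree of node t over [l,r], to recursion depth f
def Models (cur : List Int) : Nat → List Int → Nat → Nat → Nat → Prop
  | 0, _, _, _, _ => True
  | f+1, tree, t, l, r =>
      t < tree.length ∧
      (if l = r then tree.getD t 0 = cur.getD l 0
       else tree.getD t 0 = rmax cur l r
            ∧ Models cur f tree (2*t+1) l ((l+r)/2)
            ∧ Models cur f tree (2*t+2) ((l+r)/2 + 1) r)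

theorem hdesc_self (t : Nat) : hdesc t t := ⟨0, by simp⟩
theorem hdesc_le {t k : Nat} (h : hdesc t k) : t ≤ k := by
  obtain ⟨d, hd⟩ := h
  have := Nat.div_le_self (k+1) (2^d)
  omega
theorem hdesc_left {t k : Nat} (h : hdesc (2*t+1) k) : hdesc t k := by
  obtain ⟨d, hd⟩ := h
  exact ⟨d+1, by rw [pow_succ, ← Nat.div_div_eq_div_mul, hd]; omega⟩
theorem hdesc_right {t k : Nat} (h : hdesc (2*t+2) k) : hdesc t k := by
  obtain ⟨d, hd⟩ := h
  exact ⟨d+1, by rw [pow_succ, ← Nat.div_div_eq_div_mul, hd]; omega⟩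
theorem hdesc_sib {t k : Nat} (h1 : hdesc (2*t+1) k) (h2 : hdesc (2*t+2) k) : False := by
  obtain ⟨i, hi⟩ := h1
  obtain ⟨j, hj⟩ := h2
  rcases Nat.le_total i j with hij | hij
  · obtain ⟨e, he⟩ := Nat.exists_eq_add_of_le hij
    rw [he, pow_add, ← Nat.div_div_eq_div_mul, hi] at hj
    rcases Nat.eq_zero_or_pos e with h | h
    · subst h; simp at hj
    · have h2e : 2 ≤ 2^e := by
        calc 2 = 2^1 := by norm_num
        _ ≤ 2^e := Nat.pow_le_pow_right (by norm_num) h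
      have hA := Nat.div_le_div_left h2e (by norm_num : 0 < 2) (a := 2*t+1+1)
      have hB : (2*t+1+1)/2 = t+1 := by omega
      omega
  · obtain ⟨e, he⟩ := Nat.exists_eq_add_of_le hij
    rw [he, pow_add, ← Nat.div_div_eq_div_mul, hj] at hi
    rcases Nat.eq_zero_or_pos e with h | h
    · subst h; simp at hi
    · have h2e : 2 ≤ 2^e := by
        calc 2 = 2^1 := by norm_num
        _ ≤ 2^e := Nat.pow_le_pow_right (by norm_num) h
      have hA := Nat.div_le_div_left h2e (by norm_num : 0 < 2) (a := 2*t+2+1)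
      have hB : (2*t+2+1)/2 = t+1 := by omega
      omega
theorem not_hdesc_parent_left (t : Nat) : ¬ hdesc (2*t+1) t :=
  fun h => by have := hdesc_le h; omega
theorem not_hdesc_parent_right (t : Nat) : ¬ hdesc (2*t+2) t :=
  fun h => by have := hdesc_le h; omega

theorem getD_set_ne (xs : List Int) (j i : Nat) (v : Int) (h : i ≠ j) :
    (xs.set j v).getD i 0 = xs.getD i 0 := by
  simp [List.getD_eq_getElem?_getD, List.getElem?_set_ne (h := fun hh => h hh.symm)]

theorem getD_set_eq (xs : List Int) (j : Nat) (v : Int) (h : j < xs.length) :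
    (xs.set j v).getD j 0 = v := by
  simp [List.getD_eq_getElem?_getD, h]

theorem foldl_max_shift (xs : List Int) : ∀ a b : Int,
    xs.foldl max (max a b) = max a (xs.foldl max b) := by
  induction xs with
  | nil => intro a b; rfl
  | cons c xs ih =>
    intro a b
    simp only [List.foldl_cons]
    rw [max_assoc, ih]

theorem pymaxA_append (xs ys : List Int) (hx : xs ≠ []) (hy : ys ≠ []) :
    pymaxA (xs ++ ys) = max (pymaxA xs) (pymaxA ys) := by
  match xs, ys with
  | x :: xs, y :: ys =>
    show ((x :: xs) ++ y :: ys).tail.foldl max x = _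
    simp only [List.cons_append, List.tail_cons, List.foldl_append, List.foldl_cons]
    rw [foldl_max_shift]
    rfl

theorem rmax_single (cur : List Int) (l : Nat) : rmax cur l l = cur.getD l 0 := by
  simp [rmax, pymaxA]

theorem rmax_split (cur : List Int) (l m r : Nat) (h1 : l ≤ m) (h2 : m < r) :
    rmax cur l r = max (rmax cur l m) (rmax cur (m+1) r) := by
  unfold rmax
  have hr : List.range' l (r+1-l) = List.range' l (m+1-l) ++ List.range' (m+1) (r-m) := by
    have := List.range'_append (s := l) (m := m+1-l) (n := r-m) (step := 1)
    simp only [one_mul] at this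
    rw [show l + (m+1-l) = m+1 by omega, show (m+1-l) + (r-m) = r+1-l by omega] at this
    exact this.symm
  rw [hr, List.map_append, pymaxA_append] <;>
    simp [List.range'_eq_nil_iff] <;> omega

theorem rmax_congr (cur cur' : List Int) (l r : Nat)
    (h : ∀ i, l ≤ i → i ≤ r → cur'.getD i 0 = cur.getD i 0) :
    rmax cur' l r = rmax cur l r := by
  unfold rmax
  congr 1
  apply List.map_congr_left
  intro i hi
  rw [List.mem_range'_1] at hi
  exact h i hi.1 (by omega)

theorem le_pymaxA (xs : List Int) (x : Int) (h : x ∈ xs) : x ≤ pymaxA xs := by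
  match xs with
  | y :: t =>
    show x ≤ t.foldl max y
    rcases List.mem_cons.mp h with h | h
    · subst h; exact (PySem.List.le_foldl_max t x).1
    · exact (PySem.List.le_foldl_max t y).2 x h

theorem getD_le_rmax (cur : List Int) (l r i : Nat) (h1 : l ≤ i) (h2 : i ≤ r) :
    cur.getD i 0 ≤ rmax cur l r := by
  apply le_pymaxA
  exact List.mem_map.mpr ⟨i, by rw [List.mem_range'_1]; omega, rfl⟩

theorem pymaxA_all_zero (xs : List Int) (h : ∀ x ∈ xs, x = 0) : pymaxA xs = 0 := by
  match xs with
  | [] => rfl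
  | x :: t =>
    show t.foldl max x = 0
    rcases PySem.List.foldl_max_mem t x with hm | hm
    · rw [hm]; exact h x (by simp)
    · exact h _ (by simp; right; exact hm)

theorem rmax_zero (n : Nat) (l r : Nat) :
    rmax (List.replicate n (0:Int)) l r = 0 := by
  apply pymaxA_all_zero
  intro x hx
  rw [List.mem_map] at hx
  obtain ⟨i, _, hi⟩ := hx
  rw [← hi, List.getD_eq_getElem?_getD]
  rcases Nat.lt_or_ge i n with h | h
  · simp [h]
  · rw [List.getElem?_eq_none (by simpa using h)]; rfl

theorem models_root {cur : List Int} {f : Nat} {tree : List Int} {t l r : Nat}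
    (hf : 0 < f) (h : Models cur f tree t l r) :
    tree.getD t 0 = rmax cur l r := by
  match f, hf with
  | f+1, _ =>
    by_cases hlr : l = r
    · subst hlr
      simp only [Models] at h
      rw [h.2, rmax_single]
    · simp only [Models, if_neg hlr] at h
      exact h.2.1

theorem models_tree_congr {cur : List Int} : ∀ {f : Nat} {tree tree' : List Int} {t l r : Nat},
    tree'.length = tree.length →
    (∀ k, hdesc t k → tree'.getD k 0 = tree.getD k 0) →
    Models cur f tree t l r → Models cur f tree' t l r := by
  intro f
  induction f with
  | zero => intro _ _ _ _ _ _ _ _; trivial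
  | succ f ih =>
    intro tree tree' t l r hlen hk hm
    obtain ⟨ht, hrest⟩ := hm
    refine ⟨by omega, ?_⟩
    by_cases hlr : l = r
    · rw [if_pos hlr] at hrest ⊢
      rw [hk t (hdesc_self t)]; exact hrest
    · rw [if_neg hlr] at hrest ⊢
      obtain ⟨hv, hL, hR⟩ := hrest
      exact ⟨by rw [hk t (hdesc_self t)]; exact hv,
        ih hlen (fun k hd => hk k (hdesc_left hd)) hL,
        ih hlen (fun k hd => hk k (hdesc_right hd)) hR⟩

theorem models_cur_congr : ∀ {f : Nat} {cur cur' tree : List Int} {t l r : Nat},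
    l ≤ r →
    (∀ i, l ≤ i → i ≤ r → cur'.getD i 0 = cur.getD i 0) →
    Models cur f tree t l r → Models cur' f tree t l r := by
  intro f
  induction f with
  | zero => intro _ _ _ _ _ _ _ _ _; trivial
  | succ f ih =>
    intro cur cur' tree t l r hle h hm
    obtain ⟨ht, hrest⟩ := hm
    refine ⟨ht, ?_⟩
    by_cases hlr : l = r
    · rw [if_pos hlr] at hrest ⊢
      rw [h l (le_refl l) hle]; exact hrest
    · rw [if_neg hlr] at hrest ⊢
      obtain ⟨hv, hL, hR⟩ := hrest
      refine ⟨by rw [rmax_congr cur cur' l r h]; exact hv, ?_, ?_⟩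
      · exact ih (by omega) (fun i h1 h2 => h i h1 (by omega)) hL
      · exact ih (by omega) (fun i h1 h2 => h i (by omega) h2) hR

theorem cast_child_left (t : Nat) : (2*(t:Int)+1) = ((2*t+1 : Nat) : Int) := by push_cast; ring
theorem cast_child_right (t : Nat) : (2*(t:Int)+2) = ((2*t+2 : Nat) : Int) := by push_cast; ring
theorem cast_mid (l r : Nat) :
    PySem.Int.floordiv ((l:Int) + (r:Int)) 2 = (((l+r)/2 : Nat) : Int) := by
  rw [show ((l:Int) + r) = (((l+r:Nat)):Int) by push_cast; ring,
      show (2:Int) = ((2:Nat):Int) by norm_num, PySem.Int.floordiv_natCast]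
theorem query_models {cur : List Int} : ∀ (f : Nat) (tree : List Int) (t l r qr : Nat),
    l ≤ r → r - l < f → Models cur f tree t l r →
    queryA f tree (t:Int) (l:Int) (r:Int) 0 (qr:Int) =
      if qr < l then 0 else if r ≤ qr then rmax cur l r else max 0 (rmax cur l qr) := by
  intro f
  induction f with
  | zero => intro tree t l r qr hle hf hm; omega
  | succ f ih =>
    intro tree t l r qr hle hf hm
    simp only [queryA]
    by_cases hd : qr < l
    · rw [if_pos (by left; exact_mod_cast hd), if_pos hd]
    · rw [if_neg (by omega)]
      by_cases hc : r ≤ qr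
      · rw [if_pos (by constructor <;> [positivity; exact_mod_cast hc]), if_neg hd, if_pos hc]
        simpa using models_root (by omega) hm
      · rw [if_neg (by omega), if_neg hd, if_neg hc]
        -- partial overlap: l ≤ qr < r, hence l < r
        have hlr : l ≠ r := by omega
        obtain ⟨ht, hrest⟩ := hm
        rw [if_neg hlr] at hrest
        obtain ⟨hv, hL, hR⟩ := hrest
        have hmidb : l ≤ (l+r)/2 ∧ (l+r)/2 < r := by omega
        rw [cast_mid, cast_child_left, cast_child_right,
            show (((((l+r)/2 : Nat)):Int) + 1) = ((((l+r)/2+1 : Nat)):Int) by push_cast; ring,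
            ih tree (2*t+1) l ((l+r)/2) qr (by omega) (by omega) hL,
            ih tree (2*t+2) ((l+r)/2+1) r qr (by omega) (by omega) hR]
        rcases Nat.lt_or_ge ((l+r)/2) qr with hq | hq
        · -- qr > mid : left fully covered, right partial
          rw [if_neg (show ¬ qr < l by omega), if_pos (show (l+r)/2 ≤ qr by omega),
              if_neg (show ¬ qr < (l+r)/2+1 by omega), if_neg (show ¬ r ≤ qr by omega),
              rmax_split cur l ((l+r)/2) qr (by omega) (by omega)]
          rw [max_comm (0:Int) _, max_comm (0:Int) _, ← max_assoc]
        · -- qr ≤ mid : right disjoint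
          rw [if_neg (show ¬ qr < l by omega), if_pos (show qr < (l+r)/2+1 by omega)]
          rcases Nat.eq_or_lt_of_le hq with he | hlt
          · rw [if_pos (show (l+r)/2 ≤ qr by omega)]
            rw [← he, max_comm]
          · rw [if_neg (show ¬ (l+r)/2 ≤ qr by omega)]
            rw [max_comm (max (0:Int) _) 0, ← max_assoc, max_self]

theorem update_models {cur : List Int} : ∀ (f : Nat) (tree : List Int) (t l r j : Nat) (v : Int),
    l ≤ r → r - l < f → l ≤ j → j ≤ r → r < cur.length →
    Models cur f tree t l r →
    Models (cur.set j v) f (updateA f tree (t:Int) (l:Int) (r:Int) (j:Int) v) t l r ∧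
    (updateA f tree (t:Int) (l:Int) (r:Int) (j:Int) v).length = tree.length ∧
    (∀ k, ¬ hdesc t k →
      (updateA f tree (t:Int) (l:Int) (r:Int) (j:Int) v).getD k 0 = tree.getD k 0) := by
  intro f
  induction f with
  | zero => intro tree t l r j v hle hf; omega
  | succ f ih =>
    intro tree t l r j v hle hf hjl hjr hcl hm
    obtain ⟨ht, hrest⟩ := hm
    by_cases hlr : l = r
    · -- leaf: j = l = r
      have hj : j = l := by omega
      simp only [updateA, if_pos (show (l:Int) = (r:Int) by exact_mod_cast hlr)]
      subst hj hlr
      refine ⟨⟨by simpa using ht, ?_⟩, by simp, ?_⟩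
      · rw [if_pos rfl, Int.toNat_natCast, getD_set_eq tree t v ht,
            getD_set_eq cur j v (by omega)]
      · intro k hk
        rw [Int.toNat_natCast, getD_set_ne tree t k v (fun h => hk (h ▸ hdesc_self t))]
    · rw [if_neg hlr] at hrest
      obtain ⟨hv, hL, hR⟩ := hrest
      have hmidb : l ≤ (l+r)/2 ∧ (l+r)/2 < r := by omega
      simp only [updateA, if_neg (show ¬ (l:Int) = (r:Int) by exact_mod_cast hlr),
                 cast_mid, cast_child_left, cast_child_right]
      rw [show (((((l+r)/2 : Nat)):Int) + 1) = ((((l+r)/2+1 : Nat)):Int) by push_cast; ring]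
      simp only [Int.toNat_natCast]
      by_cases hjm : j ≤ (l+r)/2
      · rw [if_pos (show (j:Int) ≤ (((l+r)/2 : Nat):Int) by exact_mod_cast hjm)]
        obtain ⟨ihm, ihlen, ihfr⟩ :=
          ih tree (2*t+1) l ((l+r)/2) j v (by omega) (by omega) hjl hjm (by omega) hL
        set t1 := updateA f tree ((2*t+1 : Nat):Int) (l:Int) (((l+r)/2 : Nat):Int) (j:Int) v with ht1
        -- right child: untouched by t1, and cur.set j v agrees with cur on [mid+1, r]
        have hRnew : Models (cur.set j v) f t1 (2*t+2) ((l+r)/2+1) r := by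
          refine models_cur_congr (by omega) (fun i h1 h2 => getD_set_ne cur j i v (by omega)) ?_
          exact models_tree_congr ihlen
            (fun k hk => ihfr k (fun hk2 => hdesc_sib hk2 hk)) hR
        have hLroot : t1.getD (2*t+1) 0 = rmax (cur.set j v) l ((l+r)/2) :=
          models_root (by omega) ihm
        have hRroot : t1.getD (2*t+2) 0 = rmax (cur.set j v) ((l+r)/2+1) r :=
          models_root (by omega) hRnew
        refine ⟨⟨by simp [ihlen]; omega, ?_⟩, by simp [ihlen], ?_⟩
        · rw [if_neg hlr]
          refine ⟨?_, ?_, ?_⟩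
          · rw [getD_set_eq _ t _ (by omega : t < t1.length),
                hLroot, hRroot, rmax_split (cur.set j v) l ((l+r)/2) r (by omega) (by omega)]
          · exact models_tree_congr (by simp)
              (fun k hk => getD_set_ne t1 t k _ (fun h => absurd (h ▸ hk) (not_hdesc_parent_left t))) ihm
          · exact models_tree_congr (by simp)
              (fun k hk => getD_set_ne t1 t k _ (fun h => absurd (h ▸ hk) (not_hdesc_parent_right t))) hRnew
        · intro k hk
          rw [getD_set_ne t1 t k _ (fun h => hk (h ▸ hdesc_self t)),
              ihfr k (fun h => hk (hdesc_left h))]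
      · rw [if_neg (show ¬ (j:Int) ≤ (((l+r)/2 : Nat):Int) by exact_mod_cast hjm)]
        obtain ⟨ihm, ihlen, ihfr⟩ :=
          ih tree (2*t+2) ((l+r)/2+1) r j v (by omega) (by omega) (by omega) hjr hcl hR
        set t1 := updateA f tree ((2*t+2 : Nat):Int) (((l+r)/2+1 : Nat):Int) (r:Int) (j:Int) v with ht1
        have hLnew : Models (cur.set j v) f t1 (2*t+1) l ((l+r)/2) := by
          refine models_cur_congr (by omega) (fun i h1 h2 => getD_set_ne cur j i v (by omega)) ?_
          exact models_tree_congr ihlen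
            (fun k hk => ihfr k (fun hk2 => hdesc_sib hk hk2)) hL
        have hLroot : t1.getD (2*t+1) 0 = rmax (cur.set j v) l ((l+r)/2) :=
          models_root (by omega) hLnew
        have hRroot : t1.getD (2*t+2) 0 = rmax (cur.set j v) ((l+r)/2+1) r :=
          models_root (by omega) ihm
        refine ⟨⟨by simp [ihlen]; omega, ?_⟩, by simp [ihlen], ?_⟩
        · rw [if_neg hlr]
          refine ⟨?_, ?_, ?_⟩
          · rw [getD_set_eq _ t _ (by omega : t < t1.length),
                hLroot, hRroot, rmax_split (cur.set j v) l ((l+r)/2) r (by omega) (by omega)]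
          · exact models_tree_congr (by simp)
              (fun k hk => getD_set_ne t1 t k _ (fun h => absurd (h ▸ hk) (not_hdesc_parent_left t))) hLnew
          · exact models_tree_congr (by simp)
              (fun k hk => getD_set_ne t1 t k _ (fun h => absurd (h ▸ hk) (not_hdesc_parent_right t))) ihm
        · intro k hk
          rw [getD_set_ne t1 t k _ (fun h => hk (h ▸ hdesc_self t)),
              ihfr k (fun h => hk (hdesc_right h))]

theorem getD_replicate_zero (m i : Nat) : (List.replicate m (0:Int)).getD i 0 = 0 := by
  rw [List.getD_eq_getElem?_getD]
  rcases Nat.lt_or_ge i m with h | h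
  · simp [h]
  · rw [List.getElem?_eq_none (by simpa using h)]; rfl

theorem set_replicate_zero (m k : Nat) :
    (List.replicate m (0:Int)).set k 0 = List.replicate m 0 := by
  apply List.ext_getElem
  · simp
  · intro i h1 h2
    simp

theorem build_zero : ∀ (f : Nat) (p m : Nat) (ti l r : Int),
    buildA f (List.replicate p 0) (List.replicate m 0) ti l r = List.replicate m 0 := by
  intro f
  induction f with
  | zero => intro p m ti l r; rfl
  | succ f ih =>
    intro p m ti l r
    simp only [buildA]
    by_cases h : l = r
    · rw [if_pos h, getD_replicate_zero, set_replicate_zero]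
    · rw [if_neg h, ih, ih, getD_replicate_zero, getD_replicate_zero, max_self,
          set_replicate_zero]

theorem models_init (n : Nat) : ∀ (f d t l r : Nat),
    r - l < f → l ≤ r → r < n →
    2^d ≤ t+1 → t+1 < 2^(d+1) → 2^d * (r - l) ≤ n - 1 → 2^d ≤ max 1 (2*(n-1)) →
    Models (List.replicate n 0) f (List.replicate (4*n) 0) t l r := by
  intro f
  induction f with
  | zero => intro d t l r h; omega
  | succ f ih =>
    intro d t l r hfuel hle hr h1 h2 h3 h4
    have hps : 2^(d+1) = 2 * 2^d := by rw [pow_succ]; ring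
    have ht4 : t < 4*n := by
      have := Nat.mul_le_mul (le_refl 2) h4
      omega
    refine ⟨by simpa using ht4, ?_⟩
    by_cases hlr : l = r
    · rw [if_pos hlr, getD_replicate_zero, getD_replicate_zero]
    · rw [if_neg hlr]
      have hpd : 1 ≤ 2^d := Nat.one_le_two_pow
      have hd1 : 2^d ≤ n - 1 := by
        have := Nat.mul_le_mul (le_refl (2^d)) (show 1 ≤ r - l by omega)
        omega
      have hps2 : 2^(d+2) = 2 * 2^(d+1) := by rw [pow_succ 2 (d+1)]; ring
      refine ⟨by rw [getD_replicate_zero, rmax_zero], ?_, ?_⟩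
      · apply ih (d+1) (2*t+1) l ((l+r)/2) (by omega) (by omega) (by omega)
            (by omega) (by omega) ?_ (by omega)
        calc 2^(d+1) * ((l+r)/2 - l) = 2^d * (2*((l+r)/2 - l)) := by rw [hps]; ring
          _ ≤ 2^d * (r - l) := Nat.mul_le_mul (le_refl (2^d)) (by omega)
          _ ≤ n - 1 := h3
      · apply ih (d+1) (2*t+2) ((l+r)/2+1) r (by omega) (by omega) (by omega)
            (by omega) (by omega) ?_ (by omega)
        calc 2^(d+1) * (r - ((l+r)/2+1)) = 2^d * (2*(r - ((l+r)/2+1))) := by rw [hps]; ring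
          _ ≤ 2^d * (r - l) := Nat.mul_le_mul (le_refl (2^d)) (by omega)
          _ ≤ n - 1 := h3

theorem buildFirst_aux : ∀ (xs : List Int) (d : PySem.Dict Int Int) (s v : Int),
    ((PySem.List.enumerate xs s).foldl
      (fun d jv => if d.contains jv.2 then d else d.insert jv.2 (jv.1+1)) d).get? v
    = (if d.contains v = true then d.get? v
       else (PySem.List.index? xs v).map (fun i => (i:Int) + s + 1)) := by
  intro xs
  induction xs with
  | nil =>
    intro d s v
    simp only [PySem.List.enumerate_nil, List.foldl_nil]
    by_cases hc : d.contains v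
    · rw [if_pos hc]
    · rw [if_neg hc, (PySem.Dict.get?_eq_none_iff_contains d v).mpr (by simpa using hc)]
      simp [PySem.List.index?_eq_idxOf?]
  | cons x xs ih =>
    intro d s v
    simp only [PySem.List.enumerate_cons, List.foldl_cons]
    rw [ih]
    by_cases hxv : x = v
    · subst hxv
      by_cases hc : d.contains x
      · rw [if_pos hc, if_pos hc, if_pos hc]
      · rw [if_neg hc, if_neg hc, PySem.List.index?_cons_self]
        rw [if_pos (by rw [PySem.Dict.contains_insert]; simp)]
        rw [PySem.Dict.get?_insert_self]
        simp
    · have hvx : v ≠ x := Ne.symm hxv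
      rw [PySem.List.index?_cons_of_ne xs hxv]
      by_cases hc : d.contains x
      · rw [if_pos hc]
        by_cases hcv : d.contains v
        · rw [if_pos hcv, if_pos hcv]
        · rw [if_neg hcv, if_neg hcv]
          cases PySem.List.index? xs v <;> simp
          omega
      · rw [if_neg hc]
        rw [show ((d.insert x (s+1)).contains v) = d.contains v by
              rw [PySem.Dict.contains_insert]; simp [hvx]]
        rw [PySem.Dict.get?_insert_of_ne (hne := hvx)]
        by_cases hcv : d.contains v
        · rw [if_pos hcv, if_pos hcv]
        · rw [if_neg hcv, if_neg hcv]
          cases PySem.List.index? xs v <;> simp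
          omega

theorem buildFirst_get? : ∀ (xs : List Int) (v : Int),
    (buildFirst xs).get? v = (PySem.List.index? xs v).map (fun i => (i:Int) + 1) := by
  intro xs v
  unfold buildFirst
  rw [buildFirst_aux xs PySem.Dict.empty 0 v,
      if_neg (by simp [PySem.Dict.contains_empty])]
  cases PySem.List.index? xs v <;> simp

theorem ranks_eq (S : List Int) :
    (S.map (fun v => ((buildFirst (PySem.List.sorted S (fun x => x) false)).get? v).getD 0))
      = compute_ranks_A S := by
  unfold compute_ranks_A
  apply List.map_congr_left
  intro v hv
  have hmem : v ∈ PySem.List.sorted S (fun x => x) false := by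
    rw [PySem.List.mem_sorted]; exact hv
  obtain ⟨i, hi⟩ := Option.isSome_iff_exists.mp
    ((PySem.List.index?_isSome_iff _ _).mpr hmem)
  rw [buildFirst_get?, hi]
  simp

theorem take_rmax (cur : List Int) (rk : Nat) (h1 : 1 ≤ rk) (h2 : rk ≤ cur.length) :
    pymaxA (cur.take rk) = rmax cur 0 (rk-1) := by
  unfold rmax
  congr 1
  apply List.ext_getElem
  · simp [List.length_range']; omega
  · intro i hi1 hi2
    have hirk : i < rk ∧ i < cur.length := by simpa using hi1
    simp only [List.getElem_take, List.getElem_map, List.getElem_range']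
    rw [show 0 + 1 * i = i by omega, List.getD_eq_getElem?_getD,
        List.getElem?_eq_getElem (by omega), Option.getD_some]

theorem rank_fact (S : List Int) (i : Int) (h0 : 0 ≤ i) (hi : i < S.length) :
    ∃ rk : Nat, PySem.List.pyGetD (compute_ranks_A S) i 0 = (rk : Int) ∧
      1 ≤ rk ∧ rk ≤ S.length := by
  simp only [compute_ranks_A]
  rw [PySem.List.pyGetD_eq_getElem _ _ h0 (by simpa using hi)]
  simp only [List.getElem_map]
  have hmem : S[i.toNat]'(by omega) ∈ PySem.List.sorted S (fun x => x) false := by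
    rw [PySem.List.mem_sorted]; exact List.getElem_mem _
  obtain ⟨k, hk⟩ := Option.isSome_iff_exists.mp
    ((PySem.List.index?_isSome_iff _ _).mpr hmem)
  obtain ⟨hklt, -, -⟩ := PySem.List.getElem_of_index?_eq_some hk
  rw [PySem.List.length_sorted] at hklt
  exact ⟨k+1, by rw [hk]; push_cast [Option.getD_some]; ring, by omega, by omega⟩

-- two distinct positions holding the same value force count ≥ 2
theorem count_ge_two (v : Int) : ∀ (l : List Int) (i j : Nat), i < j → j < l.length →
    l.getD i 0 = v → l.getD j 0 = v → 2 ≤ l.count v := by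
  intro l
  induction l with
  | nil => intro i j _ hj; simp at hj
  | cons a t ih =>
    intro i j hij hj hvi hvj
    rcases Nat.eq_zero_or_pos i with h0 | h0
    · subst h0
      have hva : a = v := by simpa using hvi
      have hvt : t.getD (j-1) 0 = v := by
        rw [show a :: t = [a] ++ t by rfl] at hvj
        rw [List.getD_eq_getElem?_getD] at hvj ⊢
        rw [List.getElem?_append_right (by simp; omega)] at hvj
        simpa using hvj
      have hmem : v ∈ t := by
        rw [← hvt, List.getD_eq_getElem?_getD, List.getElem?_eq_getElem (by simp at hj; omega)]
        exact List.getElem_mem _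
      have := List.one_le_count_iff.mpr hmem
      simp [hva]
      omega
    · have hvi' : t.getD (i-1) 0 = v := by
        rw [List.getD_eq_getElem?_getD] at hvi ⊢
        rw [show a :: t = [a] ++ t by rfl, List.getElem?_append_right (by simp; omega)] at hvi
        simpa using hvi
      have hvj' : t.getD (j-1) 0 = v := by
        rw [List.getD_eq_getElem?_getD] at hvj ⊢
        rw [show a :: t = [a] ++ t by rfl, List.getElem?_append_right (by simp; omega)] at hvj
        simpa using hvj
      have := ih (i-1) (j-1) (by omega) (by simp at hj; omega) hvi' hvj'
      simp [List.count_cons]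
      omega

-- a value whose FIRST occurrence in the sorted list is the LAST slot occurs once in S
theorem count_one_of_index_last (S : List Int) (v : Int)
    (h : PySem.List.index? (PySem.List.sorted S (fun x => x) false) v
          = some (S.length - 1)) (hn : 0 < S.length) :
    S.count v = 1 := by
  obtain ⟨hklt, hval, hbefore⟩ := PySem.List.getElem_of_index?_eq_some h
  have hperm : (PySem.List.sorted S (fun x => x) false).Perm S :=
    PySem.List.sorted_perm S (fun x => x) false
  rw [← hperm.count_eq]
  set t := PySem.List.sorted S (fun x => x) false with ht
  have hlen : t.length = S.length := PySem.List.length_sorted S (fun x => x) false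
  have hdropnil : t.drop S.length = [] := by
    apply List.drop_eq_nil_of_le; omega
  have hdrop : t.drop (S.length - 1) = [v] := by
    rw [List.drop_eq_getElem_cons (by omega), hval,
        show S.length - 1 + 1 = S.length by omega, hdropnil]
  have hnot : v ∉ t.take (S.length - 1) := by
    intro hmem
    obtain ⟨j, hj, hjv⟩ := List.mem_iff_getElem.mp hmem
    have hjlt : j < S.length - 1 := by
      have := List.length_take_le (S.length - 1) t; omega
    rw [List.getElem_take] at hjv
    exact hbefore j hjlt hjv
  calc t.count v = (t.take (S.length - 1) ++ t.drop (S.length - 1)).count v := by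
        rw [List.take_append_drop]
    _ = 1 := by
        rw [List.count_append, List.count_eq_zero.mpr hnot, hdrop]
        simp

-- rank = n forces: the first occurrence of S[i] in sorted is the last slot
theorem index_last_of_rank_n (S : List Int) (i : Int) (hi0 : 0 ≤ i)
    (hin : i < S.length) (hn : 0 < S.length)
    (hri : PySem.List.pyGetD (compute_ranks_A S) i 0 = (S.length : Int)) :
    PySem.List.index? (PySem.List.sorted S (fun x => x) false) (S.getD i.toNat 0)
      = some (S.length - 1) ∧
    (PySem.List.sorted S (fun x => x) false).getD (S.length - 1) 0 = S.getD i.toNat 0 := by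
  have hgi : S.getD i.toNat 0 = S[i.toNat]'(by omega) := by
    rw [List.getD_eq_getElem?_getD, List.getElem?_eq_getElem (by omega)]; rfl
  simp only [compute_ranks_A] at hri
  rw [PySem.List.pyGetD_eq_getElem _ _ hi0 (by simpa using hin)] at hri
  simp only [List.getElem_map] at hri
  have hmem : S[i.toNat]'(by omega) ∈ PySem.List.sorted S (fun x => x) false := by
    rw [PySem.List.mem_sorted]; exact List.getElem_mem _
  obtain ⟨k, hk⟩ := Option.isSome_iff_exists.mp
    ((PySem.List.index?_isSome_iff _ _).mpr hmem)
  rw [hk] at hri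
  simp only [Option.getD_some] at hri
  have hkval : k = S.length - 1 := by omega
  obtain ⟨hklt, hval, -⟩ := PySem.List.getElem_of_index?_eq_some hk
  subst hkval
  refine ⟨by rw [hgi]; exact hk, ?_⟩
  rw [hgi, ← hval, List.getD_eq_getElem?_getD, List.getElem?_eq_getElem hklt]
  rfl

-- at most one index has rank n (= S.length): rank n means the first occurrence in
-- sorted is the last slot, which forces a unique strict maximum
theorem rank_n_unique (S : List Int) (hn : 0 < S.length) (i j : Int)
    (hi0 : 0 ≤ i) (hin : i < S.length) (hj0 : 0 ≤ j) (hjn : j < S.length)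
    (hri : PySem.List.pyGetD (compute_ranks_A S) i 0 = (S.length : Int))
    (hrj : PySem.List.pyGetD (compute_ranks_A S) j 0 = (S.length : Int)) :
    i = j := by
  obtain ⟨hii, hvi⟩ := index_last_of_rank_n S i hi0 hin hn hri
  obtain ⟨hij, hvj⟩ := index_last_of_rank_n S j hj0 hjn hn hrj
  by_contra hne
  have hvij : S.getD i.toNat 0 = S.getD j.toNat 0 := hvi.symm.trans hvj
  have hcount : S.count (S.getD i.toNat 0) = 1 := count_one_of_index_last S _ hii hn
  have hne' : i.toNat ≠ j.toNat := fun h => hne (by omega)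
  have h2 : 2 ≤ S.count (S.getD i.toNat 0) := by
    rcases Nat.lt_or_ge i.toNat j.toNat with h | h
    · exact count_ge_two _ S i.toNat j.toNat h (by omega) rfl hvij.symm
    · exact count_ge_two _ S j.toNat i.toNat (by omega) (by omega) hvij.symm rfl
  omega

theorem loop_eq (S ranks : List Int)
    (hrk : ∀ i : Int, 0 ≤ i → i < S.length → ∃ rk : Nat,
        PySem.List.pyGetD ranks i 0 = (rk : Int) ∧ 1 ≤ rk ∧ rk ≤ S.length)
    (hn : 0 < S.length) :
    ∀ (I : List Int), (∀ i ∈ I, 0 ≤ i ∧ i < S.length) →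
    List.Pairwise (fun i j => PySem.List.pyGetD ranks i 0 = (S.length:Int) →
        PySem.List.pyGetD ranks j 0 ≠ (S.length:Int)) I →
    ∀ (Aarr tree cur : List Int), cur.length = S.length →
      Models cur S.length tree 0 0 (S.length - 1) →
      ((∃ i ∈ I, PySem.List.pyGetD ranks i 0 = (S.length:Int)) →
        cur.getD (S.length - 1) 0 = 0) →
      (I.foldl
        (fun (st : List Int × List Int) i =>
          let r := PySem.List.pyGetD ranks i 0
          let q := queryA S.length st.2 0 0 ((S.length:Int)-1) 0 (r-1)
          let v := PySem.List.pyGetD S i 0 + q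
          (st.1.set (r-1).toNat v, updateA S.length st.2 0 0 ((S.length:Int)-1) (r-1) v))
        (Aarr, tree)).1 =
      (I.foldl
        (fun (st : List Int × List Int) i =>
          let r := PySem.List.pyGetD ranks i 0
          let v := PySem.List.pyGetD S i 0 + max 0 (pymaxA (st.2.take r.toNat))
          (st.1.set (r-1).toNat v, st.2.set (r-1).toNat v))
        (Aarr, cur)).1 := by
  intro I
  induction I with
  | nil => intro _ _ Aarr tree cur _ _ _; rfl
  | cons i I ih =>
    intro hmem hpw Aarr tree cur hclen hm hzero
    obtain ⟨hhead, htail⟩ := List.pairwise_cons.mp hpw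
    obtain ⟨hi0, hin⟩ := hmem i (by simp)
    obtain ⟨rk, hri, hrk1, hrkn⟩ := hrk i hi0 hin
    have hc1 : ((S.length:Int) - 1) = ((S.length - 1 : Nat) : Int) := by omega
    rw [hc1] at ih
    rw [List.foldl_cons, List.foldl_cons, hc1]
    simp only [hri]
    have hc2 : ((rk:Int) - 1) = ((rk - 1 : Nat) : Int) := by omega
    rw [hc2, show ((rk:Int)).toNat = rk from Int.toNat_natCast rk,
        show ((rk-1 : Nat):Int).toNat = rk - 1 from Int.toNat_natCast _]
    have hq := query_models (cur := cur) S.length tree 0 0 (S.length - 1) (rk - 1)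
      (by omega) (by omega) hm
    simp only [Nat.cast_zero] at hq
    have hpmq : queryA S.length tree 0 0 ((S.length - 1 : Nat):Int) 0 ((rk-1 : Nat):Int) =
        max 0 (pymaxA (cur.take rk)) := by
      rw [hq, take_rmax cur rk hrk1 (by omega)]
      by_cases he : rk = S.length
      · rw [if_neg (by omega : ¬ rk - 1 < 0), if_pos (by omega : S.length - 1 ≤ rk - 1)]
        have h0 : cur.getD (S.length - 1) 0 = 0 :=
          hzero ⟨i, by simp, by rw [hri]; exact_mod_cast congrArg (Nat.cast (R := Int)) he⟩
        have hge : (0:Int) ≤ rmax cur 0 (rk-1) := by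
          have := getD_le_rmax cur 0 (rk-1) (S.length - 1) (by omega) (by omega)
          omega
        rw [he, max_eq_right]
        rw [← he]; exact hge
      · rw [if_neg (by omega : ¬ rk - 1 < 0), if_neg (by omega : ¬ S.length - 1 ≤ rk - 1)]
    rw [hpmq]
    have hu := update_models (cur := cur) S.length tree 0 0 (S.length - 1) (rk - 1)
      (PySem.List.pyGetD S i 0 + max 0 (pymaxA (cur.take rk)))
      (by omega) (by omega) (by omega) (by omega) (by omega) hm
    simp only [Nat.cast_zero] at hu
    apply ih (fun j hj => hmem j (by simp [hj])) htail _ _ _ (by simp [hclen]) hu.1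
    -- invariant: if some remaining index has rank n, position n-1 is still 0
    intro ⟨j, hjI, hrj⟩
    by_cases he : rk = S.length
    · exact absurd hrj (hhead j hjI
        (by rw [hri]; exact_mod_cast congrArg (Nat.cast (R := Int)) he))
    · rw [getD_set_ne cur (rk-1) (S.length - 1) _ (by omega)]
      exact hzero ⟨j, by simp [hjI], hrj⟩

-- the zip-over-(S, ranks) fold of the B port equals the index fold used in loop_eq
theorem zip_fold_eq (S ranks : List Int) (hlen : ranks.length = S.length) :
    ∀ (st : List Int × List Int),
    ((S.zip ranks).foldl
      (fun (st : List Int × List Int) xr =>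
        let v := xr.1 + max 0 (pymaxA (st.2.take xr.2.toNat))
        (st.1.set (xr.2 - 1).toNat v, st.2.set (xr.2 - 1).toNat v)) st)
    = ((PySem.List.pyRange 0 (S.length:Int) 1).foldl
        (fun (st : List Int × List Int) i =>
          let r := PySem.List.pyGetD ranks i 0
          let v := PySem.List.pyGetD S i 0 + max 0 (pymaxA (st.2.take r.toNat))
          (st.1.set (r-1).toNat v, st.2.set (r-1).toNat v)) st) := by
  suffices h : ∀ (k a : Nat), a + k = S.length → ∀ (st : List Int × List Int),
      ((S.drop a).zip (ranks.drop a)).foldl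
        (fun (st : List Int × List Int) xr =>
          let v := xr.1 + max 0 (pymaxA (st.2.take xr.2.toNat))
          (st.1.set (xr.2 - 1).toNat v, st.2.set (xr.2 - 1).toNat v)) st
      = (PySem.List.pyRange (a:Int) (S.length:Int) 1).foldl
          (fun (st : List Int × List Int) i =>
            let r := PySem.List.pyGetD ranks i 0
            let v := PySem.List.pyGetD S i 0 + max 0 (pymaxA (st.2.take r.toNat))
            (st.1.set (r-1).toNat v, st.2.set (r-1).toNat v)) st by
    intro st
    simpa using h S.length 0 (by omega) st
  intro k
  induction k with
  | zero =>
    intro a ha st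
    rw [List.drop_eq_nil_of_le (by omega), PySem.List.pyRange_one_eq_nil (by omega)]
    rfl
  | succ k ihk =>
    intro a ha st
    have haS : a < S.length := by omega
    have haR : a < ranks.length := by omega
    rw [List.drop_eq_getElem_cons haS, List.drop_eq_getElem_cons haR,
        List.zip_cons_cons, List.foldl_cons,
        PySem.List.pyRange_one_cons (by exact_mod_cast haS), List.foldl_cons]
    have hgS : PySem.List.pyGetD S (a:Int) 0 = S[a]'haS := by
      rw [PySem.List.pyGetD_eq_getElem _ _ (by omega) (by simpa using haS)]; simp
    have hgR : PySem.List.pyGetD ranks (a:Int) 0 = ranks[a]'haR := by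
      rw [PySem.List.pyGetD_eq_getElem _ _ (by omega) (by simp; omega)]; simp
    simp only [hgS, hgR]
    rw [show ((a:Int) + 1) = (((a+1 : Nat)):Int) by push_cast; ring]
    exact ihk (a+1) (by omega) _

-- ===== VERDICT (by name: the statement is the Claim_ definition above) =====
theorem compute_array_A_spec : Claim_equal_compute_array_A := by
  intro S _ hpre
  unfold Spec_compute_array_A
  have hn : 0 < S.length := by
    cases S with
    | nil => exact absurd rfl hpre
    | cons a t => simp
  simp only [compute_array_A, compute_array_A_alt]
  rw [ranks_eq S]
  rw [build_zero]
  rw [zip_fold_eq S (compute_ranks_A S) (by simp [compute_ranks_A])]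
  have hinit : Models (List.replicate S.length 0) S.length
      (List.replicate (4 * S.length) 0) 0 0 (S.length - 1) := by
    apply models_init S.length S.length 0 0 0 (S.length - 1) (by omega) (by omega)
      (by omega) (by norm_num) (by norm_num) (by simp) (by simp)
  have hpw : List.Pairwise (fun i j =>
      PySem.List.pyGetD (compute_ranks_A S) i 0 = (S.length:Int) →
      PySem.List.pyGetD (compute_ranks_A S) j 0 ≠ (S.length:Int))
      (PySem.List.pyRange 0 (S.length:Int) 1) := by
    refine (PySem.List.nodup_pyRange_one 0 (S.length:Int)).imp_of_mem ?_
    intro a b ha hb hab hra hrb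
    rw [PySem.List.mem_pyRange_one] at ha hb
    exact hab (rank_n_unique S hn a b ha.1 ha.2 hb.1 hb.2 hra hrb)
  have hloop := loop_eq S (compute_ranks_A S)
    (fun i h0 hi => rank_fact S i h0 hi) hn
    (PySem.List.pyRange 0 (S.length:Int) 1)
    (fun i hi => by rw [PySem.List.mem_pyRange_one] at hi; exact ⟨hi.1, hi.2⟩)
    hpw
    (List.replicate S.length 0) (List.replicate (4 * S.length) 0)
    (List.replicate S.length 0) (by simp) hinit
    (fun _ => getD_replicate_zero _ _)
  rw [hloop]
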